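-- pv_equiv track=rewrite | github.com/luigim1998/contrucao_compiladores_2020.1 | Trabalho Final/WeakPrecedenceAnalyzer.py | combina_prod
-- ===== SOURCE A (Python) =====
-- def combina_prod(pilha, producoes):
--     """
--     Retorna -1 se nenhuma produção combinar ou o índice da produção que combina.
--     """
--     for cont1 in range(len(producoes)):
--         combina = True
--         prod = producoes[cont1]
--         if(len(pilha)-1 < len(prod[1])): # a pilha (desconsidere $) não tem quantidade de símbolos
--             combina = False
--             continue
--         for cont2 in range(-1, -len(prod[1])-1, -1):
--             if(pilha[cont2][1] == 'STATE' or
--                pilha[cont2][1] == 'OPERATOR' or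
--                pilha[cont2][1] == 'DELIMITER'): # Verifica se é estado
--                 if(prod[1][cont2] != pilha[cont2][0]):
--                     combina = False
--             elif(pilha[cont2][1] == 'IDENTIFIER'):
--                 if(prod[1][cont2] != 'id'):
--                     combina = False
--             elif(pilha[cont2][1] == 'NUMBER'):
--                 if(prod[1][cont2] != 'num'):
--                     combina = False
--             else:
--                 combina = False
--
--             if(not combina): break
--
--         if(combina): return cont1
--     return -1
-- ===== SOURCE B (Python) =====
-- def combina_prod(pilha, producoes):
--     """
--     Retorna -1 se nenhuma produção combinar ou o índice da produção que combina.
--     """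
--     # Map the stack to its grammar symbols once.
--     syms = []
--     for tok, kind in pilha:
--         if kind in ('STATE', 'OPERATOR', 'DELIMITER'):
--             syms.append(tok)
--         elif kind == 'IDENTIFIER':
--             syms.append('id')
--         elif kind == 'NUMBER':
--             syms.append('num')
--         else:
--             syms.append(None)
--     # Index each distinct RHS (short enough for the stack) by its first index.
--     first = {}
--     for i, (_, rhs) in enumerate(producoes):
--         if len(rhs) < len(pilha):
--             key = tuple(rhs)
--             if key not in first:
--                 first[key] = i
--     # Among distinct RHS keys matching the stack top, take the smallest index.
--     best = -1
--     for key, i in first.items():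
--         if list(key) == syms[len(syms) - len(key):]:
--             if best == -1 or i < best:
--                 best = i
--     return best
-- ===== Notes on version B (the rewrite author's own statement) =====
-- stated objective: alternative
-- what changed: B maps the stack to its grammar symbols once, dedups production RHSs into a first-index dict, and takes the minimal index among the distinct matching RHS keys, instead of A's per-production backwards symbol-by-symbol scan with early break.
import Mathlib
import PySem

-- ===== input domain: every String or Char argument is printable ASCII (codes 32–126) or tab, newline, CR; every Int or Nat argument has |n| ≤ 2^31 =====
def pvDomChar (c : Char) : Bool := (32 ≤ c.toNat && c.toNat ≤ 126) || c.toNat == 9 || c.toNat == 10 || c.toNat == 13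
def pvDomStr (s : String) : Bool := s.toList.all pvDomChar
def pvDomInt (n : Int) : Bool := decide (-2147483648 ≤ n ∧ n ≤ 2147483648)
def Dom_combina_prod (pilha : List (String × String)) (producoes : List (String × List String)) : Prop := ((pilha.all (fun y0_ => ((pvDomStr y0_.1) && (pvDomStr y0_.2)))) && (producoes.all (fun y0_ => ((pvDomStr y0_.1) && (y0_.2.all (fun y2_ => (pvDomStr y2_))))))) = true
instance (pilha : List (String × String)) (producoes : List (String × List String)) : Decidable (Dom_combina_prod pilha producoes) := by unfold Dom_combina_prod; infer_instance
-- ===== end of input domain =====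

-- ===== PORT A =====
-- B maps the stack to symbols once and dedups RHSs in a first-index dict instead of A's
-- per-production backwards scan; same return value, different algorithm (objective: alternative).

-- per-symbol check of A's inner loop body at index cont2 (negative indexing, as in A)
def pvA_ok (pilha : List (String × String)) (rhs : List String) (c : Int) : Bool :=
  match PySem.List.pyGet? pilha c with
  | none => false
  | some p =>
    if p.2 == "STATE" || p.2 == "OPERATOR" || p.2 == "DELIMITER" then
      PySem.List.pyGet? rhs c == some p.1
    else if p.2 == "IDENTIFIER" then
      PySem.List.pyGet? rhs c == some "id"
    else if p.2 == "NUMBER" then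
      PySem.List.pyGet? rhs c == some "num"
    else false

-- A's inner 'for cont2 in range(-1, -len(prod[1])-1, -1)' with the early break
def pvA_inner (pilha : List (String × String)) (rhs : List String) : List Int → Bool
  | [] => true
  | c :: rest => if pvA_ok pilha rhs c then pvA_inner pilha rhs rest else false

-- A's outer 'for cont1 in range(len(producoes))' with early return
def pvA_outer (pilha : List (String × String)) : List (String × List String) → Int → Int
  | [], _ => -1
  | prod :: rest, i =>
    if PySem.List.len pilha - 1 < PySem.List.len prod.2 then pvA_outer pilha rest (i + 1)
    else if pvA_inner pilha prod.2
        (PySem.List.pyRange (-1) (-(PySem.List.len prod.2) - 1) (-1)) then i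
    else pvA_outer pilha rest (i + 1)

def combina_prod (pilha : List (String × String)) (producoes : List (String × List String)) : Int :=
  pvA_outer pilha producoes 0

-- ===== PORT B =====
-- 'syms': the stack mapped once to grammar symbols (None -> none)
def pvB_syms (pilha : List (String × String)) : List (Option String) :=
  pilha.foldl (fun acc p =>
    acc ++ [if p.2 == "STATE" || p.2 == "OPERATOR" || p.2 == "DELIMITER" then some p.1
            else if p.2 == "IDENTIFIER" then some "id"
            else if p.2 == "NUMBER" then some "num"
            else none]) []

-- 'first': dict from RHS key to the first index carrying it (only RHSs shorter than the stack)
def pvB_first (pilha : List (String × String)) (producoes : List (String × List String)) :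
    PySem.Dict (List String) Int :=
  (PySem.List.enumerate producoes 0).foldl (fun d pr =>
    if PySem.List.len pr.2.2 < PySem.List.len pilha then
      if d.contains pr.2.2 then d else d.insert pr.2.2 pr.1
    else d) PySem.Dict.empty

def combina_prod_alt (pilha : List (String × String)) (producoes : List (String × List String)) : Int :=
  let syms := pvB_syms pilha
  -- 'list(key) == syms[len(syms)-len(key):]': key elements are strings, syms elements Optional
  -- strings; Python's ==-elementwise comparison is the comparison after mapping 'some' over key.
  (pvB_first pilha producoes).items.foldl (fun best kv =>
    if kv.1.map some == PySem.List.slice syms (some (PySem.List.len syms - PySem.List.len kv.1)) none then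
      if best == -1 || kv.2 < best then kv.2 else best
    else best) (-1)

-- ===== PRECONDITION & SPEC =====
def Spec_combina_prod (pilha : List (String × String)) (producoes : List (String × List String)) (out : Int) : Prop := out = combina_prod_alt pilha producoes
instance (pilha : List (String × String)) (producoes : List (String × List String)) (out : Int) : Decidable (Spec_combina_prod pilha producoes out) := by unfold Spec_combina_prod; infer_instance

-- ===== CLAIM (what is proved, stated in full; the proofs are below) =====
def Claim_equal_combina_prod : Prop := ∀ (pilha : List (String × String)) (producoes : List (String × List String)), Dom_combina_prod pilha producoes → Spec_combina_prod pilha producoes (combina_prod pilha producoes)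

-- ===== LEMMAS AND PROOFS =====

def pvSym (p : String × String) : Option String :=
  if p.2 == "STATE" || p.2 == "OPERATOR" || p.2 == "DELIMITER" then some p.1
  else if p.2 == "IDENTIFIER" then some "id"
  else if p.2 == "NUMBER" then some "num"
  else none

def pvMatch (pilha : List (String × String)) (rhs : List String) : Bool :=
  decide (rhs.length < pilha.length) &&
    (rhs.map some == (pilha.map pvSym).drop (pilha.length - rhs.length))

def pvTarget (pilha : List (String × String)) (ps : List (String × List String)) : Int :=
  match ps.findIdx? (fun p => pvMatch pilha p.2) with
  | some j => (j : Int)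
  | none => -1

lemma pvA_ok_at (pilha : List (String × String)) (rhs : List String) (k : Nat)
    (h1 : 1 ≤ k) (h2 : k ≤ rhs.length) (h3 : rhs.length < pilha.length) :
    pvA_ok pilha rhs (-(k : Int)) =
      ((pilha.map pvSym)[pilha.length - k]? == rhs[rhs.length - k]?.map some) := by
  have hp : PySem.List.pyGet? pilha (-(k:Int)) = pilha[pilha.length - k]? :=
    PySem.List.pyGet?_neg_natCast pilha k (by omega) (by omega)
  have hr : PySem.List.pyGet? rhs (-(k:Int)) = rhs[rhs.length - k]? :=
    PySem.List.pyGet?_neg_natCast rhs k (by omega) (by omega)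
  have hpl : pilha.length - k < pilha.length := by omega
  have hrl : rhs.length - k < rhs.length := by omega
  rw [List.getElem?_map]
  unfold pvA_ok
  rw [hp, hr, List.getElem?_eq_getElem hpl, List.getElem?_eq_getElem hrl]
  simp only [Option.map_some]
  set p := pilha[pilha.length - k]
  set r := rhs[rhs.length - k]
  simp only [pvSym]
  split_ifs <;> simp [beq_iff_eq, eq_comm]

lemma pvA_inner_eq_all (pilha : List (String × String)) (rhs : List String) (l : List Int) :
    pvA_inner pilha rhs l = l.all (pvA_ok pilha rhs) := by
  induction l with
  | nil => rfl
  | cons c rest ih =>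
    simp only [pvA_inner, List.all_cons, ih]
    by_cases h : pvA_ok pilha rhs c <;> simp [h]

lemma pvA_match_eq (pilha : List (String × String)) (rhs : List String)
    (hL : rhs.length < pilha.length) :
    pvA_inner pilha rhs (PySem.List.pyRange (-1) (-(PySem.List.len rhs) - 1) (-1)) =
      pvMatch pilha rhs := by
  rw [pvA_inner_eq_all]
  unfold pvMatch
  simp only [PySem.List.len_eq, decide_eq_true_eq, hL, decide_true, Bool.true_and]
  rw [Bool.eq_iff_iff]
  simp only [List.all_eq_true, beq_iff_eq]
  constructor
  · intro h
    apply List.ext_getElem?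
    intro j
    by_cases hj : j < rhs.length
    · set k := rhs.length - j with hkdef
      have hc : (-(k:Int)) ∈ PySem.List.pyRange (-1) (-(rhs.length:Int) - 1) (-1) := by
        rw [PySem.List.mem_pyRange_neg_one]
        constructor <;> [omega; omega]
      have hok := h _ hc
      rw [pvA_ok_at pilha rhs k (by omega) (by omega) hL] at hok
      rw [beq_iff_eq] at hok
      rw [List.getElem?_drop, List.getElem?_map]
      have e1 : pilha.length - rhs.length + j = pilha.length - k := by omega
      have e2 : rhs.length - k = j := by omega
      rw [e1, ← e2, hok]
    · have hn1 : (rhs.map some)[j]? = none := by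
        rw [List.getElem?_eq_none] ; simpa using by omega
      have hn2 : ((pilha.map pvSym).drop (pilha.length - rhs.length))[j]? = none := by
        rw [List.getElem?_eq_none]
        simp only [List.length_drop, List.length_map]
        omega
      rw [hn1, hn2]
  · intro h c hc
    rw [PySem.List.mem_pyRange_neg_one] at hc
    set k := (-c).toNat with hkdef
    have hck : c = -(k:Int) := by omega
    rw [hck, pvA_ok_at pilha rhs k (by omega) (by omega) hL, beq_iff_eq]
    have := congrArg (fun l => l[rhs.length - k]?) h
    simp only [List.getElem?_drop, List.getElem?_map] at this
    have e1 : pilha.length - rhs.length + (rhs.length - k) = pilha.length - k := by omega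
    rw [e1] at this
    rw [List.getElem?_map]
    exact this.symm

lemma pvA_outer_eq (pilha : List (String × String)) (ps : List (String × List String)) (i : Int) :
    pvA_outer pilha ps i =
      match ps.findIdx? (fun p => pvMatch pilha p.2) with
      | some j => i + (j : Int)
      | none => -1 := by
  induction ps generalizing i with
  | nil => rfl
  | cons prod rest ih =>
    rw [List.findIdx?_cons]
    by_cases hg : (pilha.length : Int) - 1 < (prod.2.length : Int)
    · have hnm : pvMatch pilha prod.2 = false := by
        unfold pvMatch
        simp only [Bool.and_eq_false_iff, decide_eq_false_iff_not]
        left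
        omega
      have h2 : pvA_outer pilha (prod :: rest) i = pvA_outer pilha rest (i+1) := by
        simp only [pvA_outer, PySem.List.len_eq, if_pos hg]
      rw [h2, ih (i+1), hnm]
      simp only [Bool.false_eq_true, if_false]
      cases hfi : rest.findIdx? (fun p => pvMatch pilha p.2) with
      | none => simp
      | some j =>
        simp only [Option.map_some]
        push_cast
        ring
    · have hL : prod.2.length < pilha.length := by omega
      have hin := pvA_match_eq pilha prod.2 hL
      simp only [PySem.List.len_eq] at hin
      by_cases hm : pvMatch pilha prod.2 = true
      · have h2 : pvA_outer pilha (prod :: rest) i = i := by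
          simp only [pvA_outer, PySem.List.len_eq, if_neg hg, hin, hm, if_true]
        rw [h2, hm]
        simp
      · have hm' : pvMatch pilha prod.2 = false := by simpa using hm
        have h2 : pvA_outer pilha (prod :: rest) i = pvA_outer pilha rest (i+1) := by
          simp only [pvA_outer, PySem.List.len_eq, if_neg hg, hin, hm', Bool.false_eq_true,
            if_false]
        rw [h2, ih (i+1), hm']
        simp only [Bool.false_eq_true, if_false]
        cases hfi : rest.findIdx? (fun p => pvMatch pilha p.2) with
        | none => simp
        | some j =>
          simp only [Option.map_some]
          push_cast
          ring

lemma pvB_first_step (pilha : List (String × String)) (qs : List (String × List String))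
    (q : String × List String) :
    pvB_first pilha (qs ++ [q]) =
      (if (q.2.length : Int) < (pilha.length : Int) then
        (if (pvB_first pilha qs).contains q.2 then pvB_first pilha qs
         else (pvB_first pilha qs).insert q.2 (0 + (qs.length : Int)))
       else pvB_first pilha qs) := by
  unfold pvB_first
  rw [PySem.List.enumerate_append, List.foldl_append]
  simp [PySem.List.enumerate_cons, PySem.List.enumerate_nil, PySem.List.len_eq]

lemma pvB_first_nodup (pilha : List (String × String)) (ps : List (String × List String)) :
    (pvB_first pilha ps).keys.Nodup := by
  induction ps using List.reverseRecOn with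
  | nil => simp [pvB_first, PySem.List.enumerate_nil, PySem.Dict.nodup_keys_empty]
  | append_singleton qs q ih =>
    rw [pvB_first_step]
    split_ifs with h1 h2
    · exact ih
    · exact PySem.Dict.nodup_keys_insert _ _ _ ih
    · exact ih

lemma pvB_first_get? (pilha : List (String × String)) (ps : List (String × List String))
    (key : List String) :
    (pvB_first pilha ps).get? key =
      if key.length < pilha.length then
        (ps.findIdx? (fun p => p.2 == key)).map (Nat.cast : Nat → Int)
      else none := by
  induction ps using List.reverseRecOn generalizing key with
  | nil =>
    simp [pvB_first, PySem.List.enumerate_nil, PySem.Dict.get?_empty]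
  | append_singleton qs q ih =>
    rw [pvB_first_step, List.findIdx?_append]
    by_cases hq : q.2.length < pilha.length
    · rw [if_pos (by exact_mod_cast hq)]
      by_cases hc : (pvB_first pilha qs).contains q.2
      · rw [if_pos hc]
        rw [PySem.Dict.contains_eq_isSome_get?, ih q.2, if_pos hq] at hc
        obtain ⟨j0, hj0⟩ : ∃ j0, List.findIdx? (fun p => p.2 == q.2) qs = some j0 := by
          rcases h : List.findIdx? (fun p => p.2 == q.2) qs with _ | j
          · rw [h] at hc; simp at hc
          · exact ⟨j, h⟩
        by_cases hk : key = q.2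
        · subst hk
          rw [ih q.2, if_pos hq]
          simp [hj0]
          exact hq
        · rw [ih key]
          have hfq : List.findIdx? (fun p => p.2 == key) [q] = none := by
            simp [List.findIdx?_cons]
            exact fun h => (hk h.symm).elim
          rw [hfq]
          simp
      · rw [if_neg hc]
        rw [PySem.Dict.contains_eq_isSome_get?, ih q.2, if_pos hq] at hc
        have hfq : List.findIdx? (fun p => p.2 == q.2) qs = none := by
          cases h : List.findIdx? (fun p => p.2 == q.2) qs with
          | none => rfl
          | some j => rw [h] at hc; simp at hc
        by_cases hk : key = q.2
        · subst hk
          rw [PySem.Dict.get?_insert_self, if_pos hq, hfq]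
          simp [List.findIdx?_cons]
        · rw [PySem.Dict.get?_insert_of_ne _ _ hk, ih key]
          have hfq2 : List.findIdx? (fun p => p.2 == key) [q] = none := by
            simp [List.findIdx?_cons]
            exact fun h => (hk h.symm).elim
          rw [hfq2]
          simp
    · rw [if_neg (by exact_mod_cast hq), ih key]
      by_cases hk : key.length < pilha.length
      · have hne : q.2 ≠ key := by
          intro h; rw [h] at hq; exact hq hk
        have hfq : List.findIdx? (fun p => p.2 == key) [q] = none := by
          simp [List.findIdx?_cons]
          exact hne
        rw [hfq]
        simp
      · simp [hk]

lemma pv_foldmin {κ : Type} (f : κ → Bool) (l : List (κ × Int)) (hv : ∀ kv ∈ l, 0 ≤ kv.2) :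
    (l.foldl (fun best kv =>
        if f kv.1 then (if best == -1 || kv.2 < best then kv.2 else best) else best) (-1) = -1 ∧
      ∀ kv ∈ l, f kv.1 = false) ∨
    ((∃ kv ∈ l, f kv.1 = true ∧ kv.2 =
        l.foldl (fun best kv =>
          if f kv.1 then (if best == -1 || kv.2 < best then kv.2 else best) else best) (-1)) ∧
      ∀ kv ∈ l, f kv.1 = true →
        l.foldl (fun best kv =>
          if f kv.1 then (if best == -1 || kv.2 < best then kv.2 else best) else best) (-1) ≤ kv.2) := by
  induction l using List.reverseRecOn with
  | nil => left; simp
  | append_singleton t x ih =>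
    have hv' : ∀ kv ∈ t, 0 ≤ kv.2 := fun kv h => hv kv (by simp [h])
    have hvx : 0 ≤ x.2 := hv x (by simp)
    set step := fun (best : Int) (kv : κ × Int) =>
      if f kv.1 then (if best == -1 || kv.2 < best then kv.2 else best) else best with hstepdef
    rw [List.foldl_append]
    simp only [List.foldl_cons, List.foldl_nil]
    set r := t.foldl step (-1) with hrdef
    rcases ih hv' with ⟨hr, hnone⟩ | ⟨⟨kv0, hmem0, hf0, hval0⟩, hmin⟩
    · by_cases hfx : f x.1 = true
      · right
        have : step r x = x.2 := by
          simp [hstepdef, hfx, hr]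
        rw [this]
        refine ⟨⟨x, by simp, hfx, rfl⟩, ?_⟩
        intro kv hkv hfkv
        rcases List.mem_append.mp hkv with h | h
        · rw [hnone kv h] at hfkv; cases hfkv
        · simp at h; subst h; omega
      · left
        have : step r x = r := by simp [hstepdef, hfx]
        rw [this, hr]
        refine ⟨rfl, ?_⟩
        intro kv hkv
        rcases List.mem_append.mp hkv with h | h
        · exact hnone kv h
        · simp at h; subst h; simpa using hfx
    · have hr0 : 0 ≤ r := hval0 ▸ hv' kv0 hmem0
      have hrne : (r == -1) = false := by
        simp [beq_iff_eq]; omega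
      by_cases hfx : f x.1 = true
      · right
        by_cases hlt : x.2 < r
        · have hs : step r x = x.2 := by simp [hstepdef, hfx, hrne, hlt]
          rw [hs]
          refine ⟨⟨x, by simp, hfx, rfl⟩, ?_⟩
          intro kv hkv hfkv
          rcases List.mem_append.mp hkv with h | h
          · have := hmin kv h hfkv; omega
          · simp at h; subst h; omega
        · have hs : step r x = r := by
            simp [hstepdef, hfx, hrne, hlt]
            intro h
            omega
          rw [hs]
          refine ⟨⟨kv0, by simp [hmem0], hf0, hval0⟩, ?_⟩
          intro kv hkv hfkv
          rcases List.mem_append.mp hkv with h | h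
          · exact hmin kv h hfkv
          · simp at h; subst h; omega
      · right
        have hs : step r x = r := by simp [hstepdef, hfx]
        rw [hs]
        refine ⟨⟨kv0, by simp [hmem0], hf0, hval0⟩, ?_⟩
        intro kv hkv hfkv
        rcases List.mem_append.mp hkv with h | h
        · exact hmin kv h hfkv
        · simp at h; subst h; rw [hfkv] at hfx; cases hfx rfl

lemma pvB_syms_eq (pilha : List (String × String)) : pvB_syms pilha = pilha.map pvSym := by
  unfold pvB_syms
  have := PySem.List.foldl_append_singleton_eq_map (f := pvSym) (l := pilha) (acc := [])
  simpa [pvSym] using this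

lemma pvB_test_eq (pilha : List (String × String)) (key : List String)
    (hk : key.length < pilha.length) :
    (key.map some ==
      PySem.List.slice (pvB_syms pilha)
        (some (PySem.List.len (pvB_syms pilha) - PySem.List.len key)) none) =
      pvMatch pilha key := by
  rw [pvB_syms_eq]
  have h0 : (0:Int) ≤ (pilha.length : Int) - (key.length : Int) := by omega
  unfold pvMatch
  simp only [PySem.List.len_eq, List.length_map]
  rw [PySem.List.slice_from _ h0]
  have ht : ((pilha.length : Int) - (key.length : Int)).toNat = pilha.length - key.length := by
    omega
  rw [ht]
  simp [hk]

lemma pvB_eq_target (pilha : List (String × String)) (ps : List (String × List String)) :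
    combina_prod_alt pilha ps = pvTarget pilha ps := by
  set f : List String → Bool := fun key =>
    (key.map some ==
      PySem.List.slice (pvB_syms pilha)
        (some (PySem.List.len (pvB_syms pilha) - PySem.List.len key)) none) with hfdef
  have hfeq : ∀ key, key.length < pilha.length → f key = pvMatch pilha key :=
    fun key hk => pvB_test_eq pilha key hk
  have heq : combina_prod_alt pilha ps =
      (pvB_first pilha ps).items.foldl (fun best kv =>
        if f kv.1 then (if best == -1 || kv.2 < best then kv.2 else best) else best) (-1) := rfl
  rw [heq]
  have hnd := pvB_first_nodup pilha ps
  -- every item of the dict is a (key, first index) pair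
  have hitem : ∀ kv ∈ (pvB_first pilha ps).items,
      kv.1.length < pilha.length ∧ ∃ j : Nat, kv.2 = (j : Int) ∧
        ps.findIdx? (fun p => p.2 == kv.1) = some j := by
    intro kv hkv
    have hg := (PySem.Dict.get?_eq_some_iff_mem_items _ _ _ hnd).mpr hkv
    rw [pvB_first_get? pilha ps kv.1] at hg
    by_cases hk : kv.1.length < pilha.length
    · rw [if_pos hk] at hg
      rcases h : ps.findIdx? (fun p => p.2 == kv.1) with _ | j
      · rw [h] at hg
        rw [Option.map_none] at hg
        cases hg
      · rw [h] at hg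
        simp only [Option.map_some, Option.some.injEq] at hg
        exact ⟨hk, j, hg.symm, h⟩
    · rw [if_neg hk] at hg
      cases hg
  have hv : ∀ kv ∈ (pvB_first pilha ps).items, 0 ≤ kv.2 := by
    intro kv hkv
    obtain ⟨_, j, hj, _⟩ := hitem kv hkv
    omega
  -- a matching item witnesses a matching production
  have hmatchitem : ∀ kv ∈ (pvB_first pilha ps).items, f kv.1 = true →
      ∃ j : Nat, kv.2 = (j : Int) ∧ ∃ hj : j < ps.length, pvMatch pilha ps[j].2 = true ∧
        ps[j].2 = kv.1 := by
    intro kv hkv hf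
    obtain ⟨hk, j, hj, hfi⟩ := hitem kv hkv
    rw [hfeq _ hk] at hf
    obtain ⟨hjlen, hpj, _⟩ := List.findIdx?_eq_some_iff_getElem.mp hfi
    rw [beq_iff_eq] at hpj
    exact ⟨j, hj, hjlen, by rw [hpj]; exact hf, hpj⟩
  rcases pv_foldmin f (pvB_first pilha ps).items hv with ⟨hr, hnone⟩ | ⟨⟨kv0, hmem0, hf0, hval0⟩, hmin⟩
  · -- fold returned -1: no production matches
    rw [hr]
    rcases hfi : ps.findIdx? (fun p => pvMatch pilha p.2) with _ | i
    · unfold pvTarget; rw [hfi]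
    · exfalso
      obtain ⟨hilen, hmi, _⟩ := List.findIdx?_eq_some_iff_getElem.mp hfi
      have hguard : ps[i].2.length < pilha.length := by
        have h2 := hmi
        unfold pvMatch at h2
        simp only [Bool.and_eq_true, decide_eq_true_eq] at h2
        exact h2.1
      have hkey : ∃ j, ps.findIdx? (fun p => p.2 == ps[i].2) = some j := by
        cases h : ps.findIdx? (fun p => p.2 == ps[i].2) with
        | some j => exact ⟨j, rfl⟩
        | none =>
          exfalso
          have h2 := List.findIdx?_eq_none_iff.mp h ps[i] (List.getElem_mem hilen)
          simp at h2
      obtain ⟨j, hj⟩ := hkey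
      have hget : (pvB_first pilha ps).get? ps[i].2 = some (j : Int) := by
        rw [pvB_first_get?, if_pos hguard, hj]; rfl
      have hmemj := (PySem.Dict.get?_eq_some_iff_mem_items _ _ _ hnd).mp hget
      have hfj : f ps[i].2 = true := by
        rw [hfeq _ hguard]
        exact hmi
      have h3 := hnone _ hmemj
      simp only at h3
      rw [hfj] at h3
      cases h3
  · -- fold returned the minimum matching first-index
    rcases hfi : ps.findIdx? (fun p => pvMatch pilha p.2) with _ | i
    · exfalso
      obtain ⟨j, _, hjlen, hmj, _⟩ := hmatchitem kv0 hmem0 hf0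
      have h2 := List.findIdx?_eq_none_iff.mp hfi ps[j] (List.getElem_mem hjlen)
      rw [hmj] at h2
      cases h2
    · have htv : pvTarget pilha ps = (i : Int) := by unfold pvTarget; rw [hfi]
      rw [htv]
      obtain ⟨hilen, hmi, hminidx⟩ := List.findIdx?_eq_some_iff_getElem.mp hfi
      have hguard : ps[i].2.length < pilha.length := by
        have h2 := hmi
        unfold pvMatch at h2
        simp only [Bool.and_eq_true, decide_eq_true_eq] at h2
        exact h2.1
      -- the first production with this key is number i itself
      have hfk : ps.findIdx? (fun p => p.2 == ps[i].2) = some i := by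
        apply List.findIdx?_eq_some_iff_getElem.mpr
        refine ⟨hilen, by simp, ?_⟩
        intro j hji heq
        have heq' : ps[j].2 = ps[i].2 := by simpa using heq
        apply hminidx j hji
        rw [heq']
        exact hmi
      have hget : (pvB_first pilha ps).get? ps[i].2 = some (i : Int) := by
        rw [pvB_first_get?, if_pos hguard, hfk]; rfl
      have hmemi := (PySem.Dict.get?_eq_some_iff_mem_items _ _ _ hnd).mp hget
      have hfi2 : f ps[i].2 = true := by
        rw [hfeq _ hguard]
        exact hmi
      have hle := hmin _ hmemi hfi2
      obtain ⟨j, hjval, hjlen, hmj, _⟩ := hmatchitem kv0 hmem0 hf0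
      have hge : i ≤ j := by
        by_contra hlt
        push_neg at hlt
        have h2 := hminidx j hlt
        rw [hmj] at h2
        exact h2 rfl
      omega

lemma pvA_eq_target (pilha : List (String × String)) (ps : List (String × List String)) :
    combina_prod pilha ps = pvTarget pilha ps := by
  unfold combina_prod pvTarget
  rw [pvA_outer_eq]
  cases ps.findIdx? (fun p => pvMatch pilha p.2) <;> simp

-- ===== VERDICT (by name: the statement is the Claim_ definition above) =====
theorem combina_prod_spec : Claim_equal_combina_prod := by
  intro pilha producoes _
  unfold Spec_combina_prod
  rw [pvA_eq_target, pvB_eq_target]
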